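-- pv_equiv track=rewrite | github.com/zailbreck/SNMP-Game | main.py | generate_oid_matrix
-- ===== SOURCE A (Python) =====
-- def generate_oid_matrix(base_oid, rows, cols):
--     if rows == 1:
--         matrix = [[str(base_oid + str(i)) for i in range(1, cols + 1)]]
--     elif rows == 2:
--         matrix = [
--             [str(base_oid + str(i)) for i in range(1, cols * 2, 2)],  # Ganjil
--             [str(base_oid + str(i)) for i in range(2, cols * 2 + 1, 2)]  # Genap
--         ]
--     else:
--         raise ValueError("Hanya mendukung rows=1 atau rows=2 untuk saat ini.")
--
--     return matrix
-- ===== SOURCE B (Python) =====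
-- def generate_oid_matrix(base_oid, rows, cols):
--     if rows not in (1, 2):
--         raise ValueError("Hanya mendukung rows=1 atau rows=2 untuk saat ini.")
--     matrix = [[] for _ in range(rows)]
--     for c in range(cols):
--         for r in range(rows):
--             matrix[r].append(str(base_oid + str(rows * c + r + 1)))
--     return matrix
-- ===== Notes on version B (the rewrite author's own statement) =====
-- stated objective: simpler
-- what changed: Replaces the branch on rows with its two special-cased comprehensions by one uniform column-major nested loop appending str(base_oid + str(rows*c + r + 1)) to matrix[r].
import Mathlib
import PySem

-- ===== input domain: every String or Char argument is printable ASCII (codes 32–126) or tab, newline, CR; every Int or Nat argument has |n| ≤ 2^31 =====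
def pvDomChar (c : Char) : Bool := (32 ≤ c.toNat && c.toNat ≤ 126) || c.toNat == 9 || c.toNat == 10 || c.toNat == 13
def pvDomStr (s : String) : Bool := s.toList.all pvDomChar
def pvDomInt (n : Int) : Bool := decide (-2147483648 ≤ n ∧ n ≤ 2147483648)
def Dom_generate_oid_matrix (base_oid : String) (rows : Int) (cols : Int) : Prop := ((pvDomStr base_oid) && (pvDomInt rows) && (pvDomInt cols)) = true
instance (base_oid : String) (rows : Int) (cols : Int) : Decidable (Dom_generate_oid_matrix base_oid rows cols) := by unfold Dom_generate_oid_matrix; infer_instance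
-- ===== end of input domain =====

-- B builds the matrix with one uniform column-major nested loop instead of A's branch on rows
-- with two special-cased comprehensions (simpler decomposition; equivalence of the RETURN value is proved).

-- ===== PORT A =====
def generate_oid_matrix (base_oid : String) (rows : Int) (cols : Int) : List (List String) :=
  if rows = 1 then
    [(PySem.List.pyRange 1 (cols + 1) 1).map (fun i => base_oid ++ PySem.Int.toStr i)]
  else if rows = 2 then
    [(PySem.List.pyRange 1 (cols * 2) 2).map (fun i => base_oid ++ PySem.Int.toStr i),
     (PySem.List.pyRange 2 (cols * 2 + 1) 2).map (fun i => base_oid ++ PySem.Int.toStr i)]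
  else [] -- Python raises ValueError here; excluded by Pre_

-- ===== PORT B =====
def generate_oid_matrix_alt (base_oid : String) (rows : Int) (cols : Int) : List (List String) :=
  if rows = 1 ∨ rows = 2 then
    (PySem.List.pyRange 0 cols 1).foldl
      (fun matrix c =>
        matrix.mapIdx (fun r row => row ++ [base_oid ++ PySem.Int.toStr (rows * c + (r : Int) + 1)]))
      (List.replicate rows.toNat [])
  else [] -- Python raises ValueError here; excluded by Pre_

-- ===== PRECONDITION & SPEC =====
-- exactly the inputs on which A returns (it raises ValueError for rows ∉ {1, 2})
def Pre_generate_oid_matrix (base_oid : String) (rows : Int) (cols : Int) : Prop :=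
  rows = 1 ∨ rows = 2
instance (base_oid : String) (rows : Int) (cols : Int) : Decidable (Pre_generate_oid_matrix base_oid rows cols) := by
  unfold Pre_generate_oid_matrix; infer_instance

def pvWitness_generate_oid_matrix : String × Int × Int := ("1.3.6.1.", 2, 3)

def Spec_generate_oid_matrix (base_oid : String) (rows : Int) (cols : Int) (out : List (List String)) : Prop := out = generate_oid_matrix_alt base_oid rows cols
instance (base_oid : String) (rows : Int) (cols : Int) (out : List (List String)) : Decidable (Spec_generate_oid_matrix base_oid rows cols out) := by unfold Spec_generate_oid_matrix; infer_instance

-- ===== CLAIM (what is proved, stated in full; the proofs are below) =====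
def Claim_equal_generate_oid_matrix : Prop := ∀ (base_oid : String) (rows : Int) (cols : Int), Dom_generate_oid_matrix base_oid rows cols → Pre_generate_oid_matrix base_oid rows cols → Spec_generate_oid_matrix base_oid rows cols (generate_oid_matrix base_oid rows cols)

-- ===== LEMMAS AND PROOFS =====

-- B's fold with one row: the singleton state stays a singleton and collects g c 0 per column
theorem pv_fold_one (g : Int → Nat → String) (cs : List Int) (l : List String) :
    List.foldl (fun (matrix : List (List String)) c =>
        matrix.mapIdx (fun r row => row ++ [g c r])) [l] cs
    = [l ++ cs.map (fun c => g c 0)] := by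
  induction cs generalizing l with
  | nil => simp
  | cons c cs ih => simp [List.foldl_cons, ih]

-- B's fold with two rows: the pair state collects g c 0 and g c 1 per column
theorem pv_fold_two (g : Int → Nat → String) (cs : List Int) (l₁ l₂ : List String) :
    List.foldl (fun (matrix : List (List String)) c =>
        matrix.mapIdx (fun r row => row ++ [g c r])) [l₁, l₂] cs
    = [l₁ ++ cs.map (fun c => g c 0), l₂ ++ cs.map (fun c => g c 1)] := by
  induction cs generalizing l₁ l₂ with
  | nil => simp
  | cons c cs ih => simp [List.foldl_cons, ih]

-- ===== VERDICT (by name: the statement is the Claim_ definition above) =====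
theorem generate_oid_matrix_spec : Claim_equal_generate_oid_matrix := by
  intro base_oid rows cols _ hpre
  unfold Spec_generate_oid_matrix generate_oid_matrix generate_oid_matrix_alt
  rcases hpre with h1 | h2
  · subst h1
    rw [if_pos rfl, if_pos (Or.inl rfl)]
    rw [PySem.List.pyRange_one 0 cols, PySem.List.pyRange_one 1 (cols + 1),
        show ((1:Int)).toNat = 1 from rfl, List.replicate_one,
        pv_fold_one (fun c r => base_oid ++ PySem.Int.toStr (1 * c + (r : Int) + 1))]
    simp only [Int.sub_zero, add_sub_cancel_right, List.nil_append, List.map_map]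
    refine congrArg (fun x => [x]) (List.map_congr_left ?_)
    intro k _
    simp only [Function.comp]
    congr 2
    push_cast
    ring
  · subst h2
    rw [if_neg (by decide), if_pos rfl, if_pos (Or.inr rfl)]
    rw [PySem.List.pyRange_one 0 cols,
        PySem.List.pyRange_of_pos 1 (cols * 2) (by decide : (0:Int) < 2),
        PySem.List.pyRange_of_pos 2 (cols * 2 + 1) (by decide : (0:Int) < 2),
        show ((2:Int)).toNat = 2 from rfl,
        show List.replicate 2 ([] : List String) = [[], []] from rfl,
        pv_fold_two (fun c r => base_oid ++ PySem.Int.toStr (2 * c + (r : Int) + 1))]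
    have hc1 : (if (1:Int) < cols * 2 then ((cols * 2 - 1 + 2 - 1) / 2).toNat else 0) = cols.toNat := by
      split_ifs with h <;> omega
    have hc2 : (if (2:Int) < cols * 2 + 1 then ((cols * 2 + 1 - 2 + 2 - 1) / 2).toNat else 0) = cols.toNat := by
      split_ifs with h <;> omega
    rw [hc1, hc2]
    simp only [Int.sub_zero, List.nil_append, List.map_map]
    refine congrArg₂ (fun x y => [x, y]) (List.map_congr_left ?_) (List.map_congr_left ?_) <;>
      · intro k _
        simp only [Function.comp]
        congr 2
        push_cast
        ring
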